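-- pv_equiv track=rewrite | github.com/oleg3251/smp | Lab5/cube.py | __create_start_line
-- ===== SOURCE A (Python) =====
-- def __create_start_line(length, size_z):
--     lines = []
--     for index in range(length):
--         if index < size_z:
--             line = ' ' * (size_z - index)
--         else:
--             line = ''
--         lines += [line]
--     lines += ['']
--     return lines
-- ===== SOURCE B (Python) =====
-- def __create_start_line(length, size_z):
--     lines = []
--     remaining = length
--     line = ' ' * max(size_z, 0) if remaining > 0 else ''
--     while remaining > 0:
--         lines.append(line)
--         line = line[1:]
--         remaining -= 1
--     lines.append('')
--     return lines
-- ===== Notes on version B (the rewrite author's own statement) =====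
-- stated objective: alternative
-- what changed: Instead of recomputing each indent with a conditional multiplication per index, B builds the widest indent string once and loops with a peeling accumulator: record the current string, strip one leading space, repeat; no branch and no per-index string construction.
import Mathlib
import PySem

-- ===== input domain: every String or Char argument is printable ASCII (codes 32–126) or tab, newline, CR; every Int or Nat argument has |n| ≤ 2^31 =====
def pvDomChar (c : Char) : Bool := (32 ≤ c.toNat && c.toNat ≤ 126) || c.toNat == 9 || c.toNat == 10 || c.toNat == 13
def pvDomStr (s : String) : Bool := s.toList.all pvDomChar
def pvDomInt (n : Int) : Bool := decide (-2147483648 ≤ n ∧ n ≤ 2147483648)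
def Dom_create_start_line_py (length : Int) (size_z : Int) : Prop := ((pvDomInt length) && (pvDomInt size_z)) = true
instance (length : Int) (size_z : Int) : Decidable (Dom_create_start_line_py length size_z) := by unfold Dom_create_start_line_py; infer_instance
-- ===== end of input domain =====

-- B replaces A's per-index conditional indent construction by a single peeling accumulator:
-- build the widest indent once, then record-and-strip one leading space per iteration (objective: alternative).

-- ===== PORT A =====
-- ' ' * n for possibly negative n is '' in Python; List.replicate n.toNat ' ' is exact there.
def create_start_line_py (length : Int) (size_z : Int) : List String :=
  ((PySem.List.pyRange 0 length 1).foldl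
    (fun lines index =>
      lines ++ [if index < size_z then String.mk (List.replicate (size_z - index).toNat ' ') else ""])
    []) ++ [""]

-- ===== PORT B =====
-- B's while loop over the counter `remaining`, carrying the peeling string `line`;
-- line[1:] on an ASCII string is exactly List.drop 1 on its characters.
def csl_peel (line : List Char) : Nat → List String
  | 0 => [""]
  | n + 1 => String.mk line :: csl_peel (line.drop 1) n

def create_start_line_py_alt (length : Int) (size_z : Int) : List String :=
  csl_peel (if 0 < length then List.replicate (max size_z 0).toNat ' ' else []) length.toNat

-- ===== PRECONDITION & SPEC =====
def Spec_create_start_line_py (length : Int) (size_z : Int) (out : List String) : Prop := out = create_start_line_py_alt length size_z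
instance (length : Int) (size_z : Int) (out : List String) : Decidable (Spec_create_start_line_py length size_z out) := by unfold Spec_create_start_line_py; infer_instance

-- ===== CLAIM (what is proved, stated in full; the proofs are below) =====
def Claim_equal_create_start_line_py : Prop := ∀ (length : Int) (size_z : Int), Dom_create_start_line_py length size_z → Spec_create_start_line_py length size_z (create_start_line_py length size_z)

-- ===== LEMMAS AND PROOFS =====

-- A's accumulator loop is an append-map.
theorem pv_foldl_snoc (f : Int → String) (xs : List Int) (init : List String) :
    xs.foldl (fun acc x => acc ++ [f x]) init = init ++ xs.map f := by
  induction xs generalizing init with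
  | nil => simp
  | cons a t ih => simp [List.foldl_cons, ih]

-- The peeling loop, started on k spaces, produces the tapering indents then the trailing blank line.
theorem csl_peel_replicate (k n : Nat) :
    csl_peel (List.replicate k ' ') n
      = (List.range n).map (fun i => String.mk (List.replicate (k - i) ' ')) ++ [""] := by
  induction n generalizing k with
  | zero => simp [csl_peel]
  | succ m ih =>
    have hdrop : (List.replicate k ' ').drop 1 = List.replicate (k - 1) (' ' : Char) := by
      cases k with
      | zero => simp
      | succ j => simp [List.replicate_succ]
    rw [csl_peel, hdrop, ih, List.range_succ_eq_map]
    simp [List.map_map, Function.comp, Nat.sub_sub, Nat.add_comm]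

theorem create_start_line_py_eq (length size_z : Int) :
    create_start_line_py length size_z = create_start_line_py_alt length size_z := by
  unfold create_start_line_py create_start_line_py_alt
  by_cases hl : 0 < length
  swap
  · have h0 : length.toNat = 0 := by omega
    rw [PySem.List.pyRange_one_eq_nil (by omega), h0]
    simp [csl_peel]
  rw [if_pos hl, pv_foldl_snoc, List.nil_append, PySem.List.pyRange_one, List.map_map,
      csl_peel_replicate]
  simp only [Int.sub_zero]
  congr 1
  apply List.map_congr_left
  intro i _
  simp only [Function.comp, zero_add]
  by_cases h : (i : Int) < size_z
  · rw [if_pos h]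
    have h1 : (size_z - (i : Int)).toNat = (max size_z 0).toNat - i := by omega
    rw [h1]
  · rw [if_neg h]
    have h2 : (max size_z 0).toNat - i = 0 := by omega
    simp [h2]
    rfl

-- ===== VERDICT (by name: the statement is the Claim_ definition above) =====
theorem create_start_line_py_spec : Claim_equal_create_start_line_py := by
  intro length size_z _
  exact create_start_line_py_eq length size_z
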